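-- pv_equiv track=rewrite | github.com/networkx/networkx | networkx/algorithms/connectivity/edge_augmentation.py | _lightest_meta_edges
-- ===== SOURCE A (Python) =====
-- from collections import defaultdict, namedtuple
--
-- def _ordered(u, v):
--     return (u, v) if u < v else (v, u)
--
-- MetaEdge = namedtuple('MetaEdge', ('meta_uv', 'uv', 'w'))
--
-- def _lightest_meta_edges(mapping, avail_uv, avail_w):
--     """Maps available edges in the original graph to edges in the metagraph
--
--     Parameters
--     ----------
--     mapping : dict
--         mapping produced by :func:`collapse`, that maps each node in the
--         original graph to a node in the meta graph
--
--     avail_uv : list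
--         list of edges
--
--     avail_w : list
--         list of edge weights
--
--     Notes
--     -----
--     Each node in the metagraph is a k-edge-cc in the original graph.  We dont
--     care about any edge within the same k-edge-cc, so we ignore self edges.  We
--     also are only intereseted in the minimum weight edge bridging each
--     k-edge-cc so, we group the edges by meta-edge and take the lightest in each
--     group.
--
--     Example
--     -------
--     >>> # Each group represents a meta-node
--     >>> groups = ([1, 2, 3], [4, 5], [6])
--     >>> mapping = {n: meta_n for meta_n, ns in enumerate(groups) for n in ns}
--     >>> avail_uv = [(1, 2), (3, 6), (1, 4), (5, 2), (6, 1), (2, 6), (3, 1)]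
--     >>> avail_w =  [    20,     99,     20,     15,     50,     99,     20]
--     >>> sorted(_lightest_meta_edges(mapping, avail_uv, avail_w))
--     [MetaEdge(meta_uv=(0, 1), uv=(5, 2), w=15), MetaEdge(meta_uv=(0, 2), uv=(6, 1), w=50)]
--     """
--     grouped_wuv = defaultdict(list)
--     for w, (u, v) in zip(avail_w, avail_uv):
--         # Order the meta-edge so it can be used as a dict key
--         meta_uv = _ordered(mapping[u], mapping[v])
--         # Group each available edge using the meta-edge as a key
--         grouped_wuv[meta_uv].append((w, u, v))
--
--     # Now that all available edges are grouped, choose one per group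
--     for (mu, mv), choices_wuv in grouped_wuv.items():
--         # Ignore available edges within the same meta-node
--         if mu != mv:
--             # Choose the lightest available edge belonging to each meta-edge
--             w, u, v = min(choices_wuv)
--             yield MetaEdge((mu, mv), (u, v), w)
-- ===== SOURCE B (Python) =====
-- from collections import namedtuple
--
-- MetaEdge = namedtuple('MetaEdge', ('meta_uv', 'uv', 'w'))
--
--
-- def _lightest_meta_edges(mapping, avail_uv, avail_w):
--     # One pass: keep only the lightest (w, u, v) seen so far per meta-edge.
--     best = {}
--     for w, (u, v) in zip(avail_w, avail_uv):
--         mu, mv = mapping[u], mapping[v]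
--         meta_uv = (mu, mv) if mu < mv else (mv, mu)
--         cand = (w, u, v)
--         cur = best.get(meta_uv)
--         if cur is None or cand < cur:
--             best[meta_uv] = cand
--     for (mu, mv), (w, u, v) in best.items():
--         if mu != mv:
--             yield MetaEdge((mu, mv), (u, v), w)
-- ===== Notes on version B (the rewrite author's own statement) =====
-- stated objective: simpler
-- what changed: B folds the running minimum into one dict keyed by meta-edge during a single pass (strict tuple-< update), instead of building per-group lists and reducing each group with min afterward
import Mathlib
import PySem

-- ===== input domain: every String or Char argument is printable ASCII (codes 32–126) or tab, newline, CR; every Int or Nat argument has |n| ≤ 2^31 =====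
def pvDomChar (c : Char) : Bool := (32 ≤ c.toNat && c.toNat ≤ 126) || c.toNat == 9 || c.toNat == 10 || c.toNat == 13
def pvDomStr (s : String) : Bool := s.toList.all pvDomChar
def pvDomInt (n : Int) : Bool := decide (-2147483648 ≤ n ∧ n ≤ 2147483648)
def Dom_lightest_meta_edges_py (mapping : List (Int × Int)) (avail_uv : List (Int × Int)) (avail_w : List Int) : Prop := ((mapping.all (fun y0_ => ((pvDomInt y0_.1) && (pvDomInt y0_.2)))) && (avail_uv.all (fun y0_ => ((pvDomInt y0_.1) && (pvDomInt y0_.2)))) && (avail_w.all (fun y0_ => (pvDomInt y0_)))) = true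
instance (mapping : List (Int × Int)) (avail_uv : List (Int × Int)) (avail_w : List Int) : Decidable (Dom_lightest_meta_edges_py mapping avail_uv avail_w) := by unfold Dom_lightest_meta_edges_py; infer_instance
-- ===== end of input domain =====

-- B changes the decomposition: one pass keeping the lightest (w,u,v) per meta-edge in a dict,
-- instead of A's grouping into per-key lists followed by a min over each group ("simpler").

-- ===== PORT A =====
-- _ordered(u, v)
def pvOrdered (u v : Int) : Int × Int := if u < v then (u, v) else (v, u)

-- Python's lexicographic '<' on an int 3-tuple (exact: ints compare by value)
def pvTripLt (x y : Int × Int × Int) : Bool :=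
  if x.1 < y.1 then true else if y.1 < x.1 then false
  else if x.2.1 < y.2.1 then true else if y.2.1 < x.2.1 then false
  else decide (x.2.2 < y.2.2)

-- mapping[k]; exact when k is a key of mapping (guaranteed by Pre_)
def pvLookup (mapping : List (Int × Int)) (k : Int) : Int :=
  ((PySem.Dict.ofList mapping).get? k).getD 0

-- _ordered(mapping[u], mapping[v]) for the zipped element p = (w, u, v)
def pvMetaKey (mapping : List (Int × Int)) (p : Int × Int × Int) : Int × Int :=
  pvOrdered (pvLookup mapping p.2.1) (pvLookup mapping p.2.2)

def lightest_meta_edges_py (mapping : List (Int × Int)) (avail_uv : List (Int × Int)) (avail_w : List Int) : List ((Int × Int) × (Int × Int) × Int) :=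
  -- grouped_wuv[meta_uv].append((w, u, v))  (defaultdict(list))
  let grouped := (avail_w.zip avail_uv).foldl
      (fun d p => d.modify (pvMetaKey mapping (p.1, p.2.1, p.2.2)) []
                    (· ++ [(p.1, p.2.1, p.2.2)]))
      PySem.Dict.empty
  -- for (mu, mv), choices_wuv in grouped.items(): if mu != mv: yield min(...)
  grouped.items.foldl (fun acc kv =>
      if kv.1.1 ≠ kv.1.2 then
        match kv.2 with
        | [] => acc  -- unreachable: every group is nonempty
        | x :: xs =>
          -- min(choices_wuv): Python's built-in min, first minimal tuple
          let m := xs.foldl (fun c y => if pvTripLt y c then y else c) x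
          acc ++ [((kv.1.1, kv.1.2), (m.2.1, m.2.2), m.1)]
      else acc) []

-- ===== PORT B =====
-- cur = best.get(meta_uv); if cur is None or cand < cur: best[meta_uv] = cand
def pvStep (d : PySem.Dict (Int × Int) (Int × Int × Int)) (k : Int × Int) (x : Int × Int × Int) : PySem.Dict (Int × Int) (Int × Int × Int) :=
  match d.get? k with
  | none => d.insert k x
  | some cur => if pvTripLt x cur then d.insert k x else d

def lightest_meta_edges_py_alt (mapping : List (Int × Int)) (avail_uv : List (Int × Int)) (avail_w : List Int) : List ((Int × Int) × (Int × Int) × Int) :=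
  let best := (avail_w.zip avail_uv).foldl
      (fun d p => pvStep d (pvMetaKey mapping (p.1, p.2.1, p.2.2)) (p.1, p.2.1, p.2.2))
      PySem.Dict.empty
  best.items.foldl (fun acc kv =>
      if kv.1.1 ≠ kv.1.2 then
        acc ++ [((kv.1.1, kv.1.2), (kv.2.2.1, kv.2.2.2), kv.2.1)]
      else acc) []

-- ===== PRECONDITION & SPEC =====
-- Pre_ excludes exactly the inputs where Python A raises KeyError: an endpoint of a zipped edge absent from mapping.
def Pre_lightest_meta_edges_py (mapping : List (Int × Int)) (avail_uv : List (Int × Int)) (avail_w : List Int) : Prop :=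
  ∀ p ∈ avail_w.zip avail_uv, p.2.1 ∈ mapping.map Prod.fst ∧ p.2.2 ∈ mapping.map Prod.fst
instance (mapping : List (Int × Int)) (avail_uv : List (Int × Int)) (avail_w : List Int) : Decidable (Pre_lightest_meta_edges_py mapping avail_uv avail_w) := by unfold Pre_lightest_meta_edges_py; infer_instance

def pvWitness_lightest_meta_edges_py : (List (Int × Int)) × (List (Int × Int)) × List Int :=
  ([(1, 0), (2, 0), (3, 1)], [(1, 3), (2, 3)], [5, 4])

def Spec_lightest_meta_edges_py (mapping : List (Int × Int)) (avail_uv : List (Int × Int)) (avail_w : List Int) (out : List ((Int × Int) × (Int × Int) × Int)) : Prop := out = lightest_meta_edges_py_alt mapping avail_uv avail_w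
instance (mapping : List (Int × Int)) (avail_uv : List (Int × Int)) (avail_w : List Int) (out : List ((Int × Int) × (Int × Int) × Int)) : Decidable (Spec_lightest_meta_edges_py mapping avail_uv avail_w out) := by unfold Spec_lightest_meta_edges_py; infer_instance

-- ===== CLAIM (what is proved, stated in full; the proofs are below) =====
def Claim_equal_lightest_meta_edges_py : Prop := ∀ (mapping : List (Int × Int)) (avail_uv : List (Int × Int)) (avail_w : List Int), Dom_lightest_meta_edges_py mapping avail_uv avail_w → Pre_lightest_meta_edges_py mapping avail_uv avail_w → Spec_lightest_meta_edges_py mapping avail_uv avail_w (lightest_meta_edges_py mapping avail_uv avail_w)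

-- ===== LEMMAS AND PROOFS =====

-- the zipped elements tagged with their meta-edge key
def pvPairs (mapping : List (Int × Int)) (avail_uv : List (Int × Int)) (avail_w : List Int) : List ((Int × Int) × (Int × Int × Int)) :=
  (avail_w.zip avail_uv).map (fun p => (pvMetaKey mapping (p.1, p.2.1, p.2.2), (p.1, p.2.1, p.2.2)))

-- one step of folding a minimum through an Option accumulator
def pvOptMin (o : Option (Int × Int × Int)) (y : Int × Int × Int) : Option (Int × Int × Int) :=
  some (match o with | none => y | some c => if pvTripLt y c then y else c)

lemma pvOptMin_foldl_some (xs : List (Int × Int × Int)) (c : Int × Int × Int) :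
    xs.foldl pvOptMin (some c) = some (xs.foldl (fun c y => if pvTripLt y c then y else c) c) := by
  induction xs generalizing c with
  | nil => rfl
  | cons x xs ih => simp [List.foldl, pvOptMin, ih]

lemma pvStep_foldl_get? (l : List ((Int × Int) × (Int × Int × Int))) (d : PySem.Dict (Int × Int) (Int × Int × Int)) (k : Int × Int) :
    (l.foldl (fun d q => pvStep d q.1 q.2) d).get? k
      = ((l.filter (fun q => q.1 == k)).map (·.2)).foldl pvOptMin (d.get? k) := by
  induction l generalizing d with
  | nil => rfl
  | cons q l ih =>
    rw [List.foldl_cons, ih]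
    by_cases hq : q.1 = k
    · subst hq
      have hstep : (pvStep d q.1 q.2).get? q.1 = pvOptMin (d.get? q.1) q.2 := by
        unfold pvStep pvOptMin
        cases h : d.get? q.1 with
        | none => simp [PySem.Dict.get?_insert_self]
        | some cur =>
          by_cases ht : pvTripLt q.2 cur
          · simp [ht, PySem.Dict.get?_insert_self]
          · simp [ht, h]
      simp [hstep]
    · have hstep : (pvStep d q.1 q.2).get? k = d.get? k := by
        unfold pvStep
        cases h : d.get? q.1 with
        | none => exact PySem.Dict.get?_insert_of_ne d q.2 (fun h' => hq h'.symm)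
        | some cur =>
          by_cases ht : pvTripLt q.2 cur
          · simp only [ht, if_true]
            exact PySem.Dict.get?_insert_of_ne d q.2 (fun h' => hq h'.symm)
          · simp [ht]
      simp [hstep, hq]

lemma pvStep_keys (l : List ((Int × Int) × (Int × Int × Int))) (d : PySem.Dict (Int × Int) (Int × Int × Int)) :
    (l.foldl (fun d q => pvStep d q.1 q.2) d).keys = PySem.Set.update d.keys (l.map (·.1)) := by
  induction l generalizing d with
  | nil => rfl
  | cons q l ih =>
    rw [List.foldl_cons, ih, List.map_cons, PySem.Set.update_cons]
    congr 1
    unfold pvStep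
    cases h : d.get? q.1 with
    | none =>
      have hc : d.contains q.1 = false := by
        rw [PySem.Dict.contains_eq_isSome_get?, h]; rfl
      have hm : q.1 ∉ d.keys := by
        intro hmem
        exact absurd ((PySem.Dict.contains_iff_mem_keys d q.1).2 hmem) (by simp [hc])
      rw [PySem.Dict.keys_insert_of_not_contains d q.2 hc, PySem.Set.add_of_not_mem hm]
    | some cur =>
      have hc : d.contains q.1 = true := by
        rw [PySem.Dict.contains_eq_isSome_get?, h]; rfl
      have hm : q.1 ∈ d.keys := (PySem.Dict.contains_iff_mem_keys d q.1).1 hc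
      by_cases ht : pvTripLt q.2 cur
      · simp [ht, PySem.Dict.keys_insert_of_contains d q.2 hc, PySem.Set.add_of_mem hm]
      · simp [ht, PySem.Set.add_of_mem hm]

-- the two second-phase loop bodies, named so the main lemma can speak about them
def pvOutA (acc : List ((Int × Int) × (Int × Int) × Int)) (kv : (Int × Int) × List (Int × Int × Int)) : List ((Int × Int) × (Int × Int) × Int) :=
  if kv.1.1 ≠ kv.1.2 then
    match kv.2 with
    | [] => acc
    | x :: xs =>
      let m := xs.foldl (fun c y => if pvTripLt y c then y else c) x
      acc ++ [((kv.1.1, kv.1.2), (m.2.1, m.2.2), m.1)]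
  else acc

def pvOutB (acc : List ((Int × Int) × (Int × Int) × Int)) (kv : (Int × Int) × (Int × Int × Int)) : List ((Int × Int) × (Int × Int) × Int) :=
  if kv.1.1 ≠ kv.1.2 then
    acc ++ [((kv.1.1, kv.1.2), (kv.2.2.1, kv.2.2.2), kv.2.1)]
  else acc

lemma pvMain (l : List ((Int × Int) × (Int × Int × Int))) :
    (l.foldl (fun d q => d.modify q.1 [] (· ++ [q.2])) PySem.Dict.empty).items.foldl pvOutA []
      = (l.foldl (fun d q => pvStep d q.1 q.2) PySem.Dict.empty).items.foldl pvOutB [] := by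
  have hKA : (l.foldl (fun d q => d.modify q.1 [] (· ++ [q.2])) PySem.Dict.empty).keys
      = PySem.Set.ofList (l.map Prod.fst) := by
    have h := PySem.Dict.keys_foldl_modify_key l Prod.fst [] (fun _ q old => old ++ [q.2]) PySem.Dict.empty
    simpa [PySem.Dict.keys_empty, PySem.Set.update_nil_left] using h
  have hKB : (l.foldl (fun d q => pvStep d q.1 q.2) PySem.Dict.empty).keys
      = PySem.Set.ofList (l.map Prod.fst) := by
    rw [pvStep_keys, PySem.Dict.keys_empty, PySem.Set.update_nil_left]
  rw [PySem.Dict.items_eq_map_keys _ (hKA ▸ PySem.Set.nodup_ofList (l.map Prod.fst)) [],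
      PySem.Dict.items_eq_map_keys _ (hKB ▸ PySem.Set.nodup_ofList (l.map Prod.fst)) ((0 : Int), (0 : Int), (0 : Int)),
      hKA, hKB, List.foldl_map, List.foldl_map]
  apply PySem.List.foldl_congr_mem
  intro acc k hk
  have hkmem : k ∈ l.map Prod.fst := (PySem.Set.mem_ofList (l.map Prod.fst) k).1 hk
  obtain ⟨q, hq, hq1⟩ := List.mem_map.1 hkmem
  have hA : (l.foldl (fun d q => d.modify q.1 [] (· ++ [q.2])) PySem.Dict.empty).getD k []
      = (l.filter (fun q => q.1 == k)).map (·.2) := by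
    have h := PySem.Dict.getD_foldl_modify_append l PySem.Dict.empty k
    simpa [PySem.Dict.getD_empty] using h
  have hB : (l.foldl (fun d q => pvStep d q.1 q.2) PySem.Dict.empty).get? k
      = ((l.filter (fun q => q.1 == k)).map (·.2)).foldl pvOptMin none := by
    have h := pvStep_foldl_get? l PySem.Dict.empty k
    simpa [PySem.Dict.get?_empty] using h
  have hqF : q.2 ∈ (l.filter (fun q => q.1 == k)).map (·.2) :=
    List.mem_map.2 ⟨q, List.mem_filter.2 ⟨hq, by simp [hq1]⟩, rfl⟩
  cases hF : (l.filter (fun q => q.1 == k)).map (·.2) with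
  | nil => rw [hF] at hqF; cases hqF
  | cons x xs =>
    have hBsome : (l.foldl (fun d q => pvStep d q.1 q.2) PySem.Dict.empty).get? k
        = some (xs.foldl (fun c y => if pvTripLt y c then y else c) x) := by
      rw [hB, hF, List.foldl_cons]
      have : pvOptMin none x = some x := rfl
      rw [this, pvOptMin_foldl_some]
    have hBgetD : (l.foldl (fun d q => pvStep d q.1 q.2) PySem.Dict.empty).getD k ((0 : Int), (0 : Int), (0 : Int))
        = xs.foldl (fun c y => if pvTripLt y c then y else c) x :=
      PySem.Dict.getD_of_get?_eq_some _ _ hBsome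
    rw [hA, hF, hBgetD]
    unfold pvOutA pvOutB
    by_cases hne : k.1 ≠ k.2 <;> simp [hne]

-- ===== VERDICT (by name: the statement is the Claim_ definition above) =====
theorem lightest_meta_edges_py_spec : Claim_equal_lightest_meta_edges_py := by
  intro mapping avail_uv avail_w _hdom _hpre
  unfold Spec_lightest_meta_edges_py
  show (lightest_meta_edges_py mapping avail_uv avail_w) = _
  unfold lightest_meta_edges_py lightest_meta_edges_py_alt
  have hfoldA : (avail_w.zip avail_uv).foldl
      (fun d p => d.modify (pvMetaKey mapping (p.1, p.2.1, p.2.2)) [] (· ++ [(p.1, p.2.1, p.2.2)]))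
      PySem.Dict.empty
      = (pvPairs mapping avail_uv avail_w).foldl (fun d q => d.modify q.1 [] (· ++ [q.2])) PySem.Dict.empty := by
    rw [pvPairs, List.foldl_map]
  have hfoldB : (avail_w.zip avail_uv).foldl
      (fun d p => pvStep d (pvMetaKey mapping (p.1, p.2.1, p.2.2)) (p.1, p.2.1, p.2.2))
      PySem.Dict.empty
      = (pvPairs mapping avail_uv avail_w).foldl (fun d q => pvStep d q.1 q.2) PySem.Dict.empty := by
    rw [pvPairs, List.foldl_map]
  rw [hfoldA, hfoldB]
  exact pvMain (pvPairs mapping avail_uv avail_w)
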